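-- pv_equiv track=rewrite | github.com/BlueConfetti/pybundle | bundler/bundler.py | _get_dependency_chain_str
-- ===== SOURCE A (Python) =====
-- def _get_dependency_chain_str(call_graph, target_function):
--     from collections import defaultdict
--
--     # Build an adjacency list for the call graph
--     adj_list = defaultdict(list)
--     for caller, callees in call_graph.items():
--         adj_list[caller].extend(callees)
--
--     # Recursive function to build the dependency chain string
--     def build_chain(function, indent="", visited=None):
--         if visited is None:
--             visited = set()
--         if function in visited:
--             return f"{indent}{function[1]} (recursive call)\n"
--         visited.add(function)
--         result = f"{indent}{function[1]}\n"
--         for callee in adj_list.get(function, []):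
--             result += build_chain(callee, indent + "    ", visited)
--         return result
--
--     # Start building from the target function
--     if '.' in target_function:
--         parts = target_function.split('.')
--         function_name = parts[-1]
--         module_name = '.'.join(parts[:-1]) or None
--     else:
--         function_name = target_function
--         module_name = None
--
--     dependency_chain_str = build_chain((module_name, function_name))
--     return dependency_chain_str
-- ===== SOURCE B (Python) =====
-- def _get_dependency_chain_str(call_graph, target_function):
--     from collections import defaultdict
--
--     # Build an adjacency list for the call graph
--     adj_list = defaultdict(list)
--     for caller, callees in call_graph.items():
--         adj_list[caller].extend(callees)
--
--     # Parse the target into a (module, name) node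
--     if '.' in target_function:
--         parts = target_function.split('.')
--         function_name = parts[-1]
--         module_name = '.'.join(parts[:-1]) or None
--     else:
--         function_name = target_function
--         module_name = None
--
--     # Iterative DFS with an explicit stack instead of recursion
--     lines = []
--     visited = set()
--     stack = [((module_name, function_name), "")]
--     while stack:
--         function, indent = stack.pop()
--         if function in visited:
--             lines.append(f"{indent}{function[1]} (recursive call)\n")
--             continue
--         visited.add(function)
--         lines.append(f"{indent}{function[1]}\n")
--         for callee in reversed(adj_list.get(function, [])):
--             stack.append((callee, indent + "    "))
--     return "".join(lines)
-- ===== Notes on version B (the rewrite author's own statement) =====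
-- stated objective: alternative
-- what changed: A's recursive build_chain (nested recursion threading a visited set) is replaced by an iterative DFS over an explicit stack of (node, indent) frames that collects the output lines in a list and joins them.
import Mathlib
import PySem

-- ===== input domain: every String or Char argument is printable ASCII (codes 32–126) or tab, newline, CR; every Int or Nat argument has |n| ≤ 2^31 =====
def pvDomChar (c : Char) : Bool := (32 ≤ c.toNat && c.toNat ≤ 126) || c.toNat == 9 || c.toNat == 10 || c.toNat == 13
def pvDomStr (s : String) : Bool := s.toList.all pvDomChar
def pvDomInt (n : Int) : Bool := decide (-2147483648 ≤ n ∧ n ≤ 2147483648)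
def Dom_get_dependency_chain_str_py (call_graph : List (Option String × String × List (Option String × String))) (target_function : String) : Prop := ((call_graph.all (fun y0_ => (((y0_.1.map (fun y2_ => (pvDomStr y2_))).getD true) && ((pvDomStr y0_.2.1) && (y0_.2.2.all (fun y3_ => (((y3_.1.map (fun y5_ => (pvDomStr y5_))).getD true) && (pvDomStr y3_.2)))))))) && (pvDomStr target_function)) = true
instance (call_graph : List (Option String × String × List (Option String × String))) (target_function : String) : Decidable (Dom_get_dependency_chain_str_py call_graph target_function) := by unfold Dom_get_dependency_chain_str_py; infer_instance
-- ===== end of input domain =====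

-- B replaces A's recursive build_chain by an iterative explicit-stack DFS collecting lines in a list (objective: alternative decomposition, same cost).

abbrev PvNode := Option String × String

-- Shared helpers (both Pythons build the same adjacency list and parse the target identically):
-- adj_list = defaultdict(list); for caller, callees in call_graph.items(): adj_list[caller].extend(callees)
def pvAdjList (call_graph : List (Option String × String × List (Option String × String))) :
    PySem.Dict PvNode (List PvNode) :=
  call_graph.foldl (fun d e => d.modify (e.1, e.2.1) [] (· ++ e.2.2)) PySem.Dict.empty

-- target parsing: module/function split on '.'
def pvStartNode (target_function : String) : PvNode :=
  if PySem.Str.isIn "." target_function then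
    let parts := (PySem.Str.split? target_function ".").getD []   -- split? is none only for sep = ""
    let function_name := (PySem.List.pyGet? parts (-1)).getD ""   -- parts[-1]; split never returns [], so the default is unreachable
    let module_name := PySem.Str.join "." parts.dropLast
    ((if module_name = "" then none else some module_name), function_name)
  else
    (none, target_function)

-- ===== PORT A =====
-- A's recursive build_chain, with a fuel guard making the nested recursion total (the fuel given
-- below is proved sufficient in pvBuildChain_total; none is never returned there).
mutual
def pvBuildChain (adj : PySem.Dict PvNode (List PvNode)) (fuel : Nat) (function : PvNode)
    (indent : String) (visited : PySem.Set PvNode) : Option (String × PySem.Set PvNode) :=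
  match fuel with
  | 0 => none
  | fuel + 1 =>
    if PySem.Set.contains visited function then
      some (indent ++ function.2 ++ " (recursive call)\n", visited)
    else
      let visited := PySem.Set.add visited function
      match pvBuildList adj fuel (adj.getD function []) (indent ++ "    ") visited with
      | none => none
      | some (s, v) => some (indent ++ function.2 ++ "\n" ++ s, v)
  termination_by (fuel, 0)
def pvBuildList (adj : PySem.Dict PvNode (List PvNode)) (fuel : Nat) (callees : List PvNode)
    (indent : String) (visited : PySem.Set PvNode) : Option (String × PySem.Set PvNode) :=
  match callees with
  | [] => some ("", visited)
  | c :: rest =>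
    match pvBuildChain adj fuel c indent visited with
    | none => none
    | some (s1, v1) =>
      match pvBuildList adj fuel rest indent v1 with
      | none => none
      | some (s2, v2) => some (s1 ++ s2, v2)
  termination_by (fuel, callees.length + 1)
end

def get_dependency_chain_str_py (call_graph : List (Option String × String × List (Option String × String))) (target_function : String) : String :=
  let adj := pvAdjList call_graph
  match pvBuildChain adj (adj.keys.length + 1) (pvStartNode target_function) "" PySem.Set.empty with
  | some (s, _) => s
  | none => ""   -- unreachable: the fuel is sufficient (pvBuildChain_total)

-- ===== PORT B =====
-- nodes of adj.keys not yet visited; decreases whenever a new key is marked visited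
def pvMeasure (adj : PySem.Dict PvNode (List PvNode)) (visited : PySem.Set PvNode) : Nat :=
  (adj.keys.filter (fun k => !(PySem.Set.contains visited k))).length

-- membership in a Set only grows under add
lemma pvContains_add_of_contains (visited : PySem.Set PvNode) (f x : PvNode)
    (h : PySem.Set.contains visited x = true) : PySem.Set.contains (PySem.Set.add visited f) x = true := by
  simp only [PySem.Set.contains] at h ⊢
  simp at h ⊢
  exact Or.inl h


lemma pvMeasure_le_of_contains (adj : PySem.Dict PvNode (List PvNode))
    (vis v' : PySem.Set PvNode)
    (h : ∀ x, PySem.Set.contains vis x = true → PySem.Set.contains v' x = true) :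
    pvMeasure adj v' ≤ pvMeasure adj vis := by
  unfold pvMeasure
  rw [← List.countP_eq_length_filter, ← List.countP_eq_length_filter]
  apply List.countP_mono_left
  intro x _ hx
  cases hcv : PySem.Set.contains vis x with
  | false => simp [hcv]
  | true => rw [h x hcv] at hx; simp at hx

lemma pvFilter_length_lt {α : Type} {l : List α} {p q : α → Bool}
    (hpq : ∀ x ∈ l, p x = true → q x = true) {f : α} (hf : f ∈ l)
    (h1 : p f = false) (h2 : q f = true) : (l.filter p).length < (l.filter q).length := by
  induction l with
  | nil => cases hf
  | cons a t ih =>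
    rcases List.mem_cons.mp hf with rfl | hft
    · rw [List.filter_cons, List.filter_cons, h1, h2]
      simpa using Nat.lt_succ_of_le (by
        rw [← List.countP_eq_length_filter, ← List.countP_eq_length_filter]
        exact List.countP_mono_left (fun x hx => hpq x (List.mem_cons_of_mem _ hx)))
    · have := ih (fun x hx => hpq x (List.mem_cons_of_mem a hx)) hft
      rw [List.filter_cons, List.filter_cons]
      cases hpa : p a
      · cases hqa : q a <;> simp <;> omega
      · rw [hpq a (List.mem_cons_self) hpa]; simpa using this

lemma pvMeasure_add_le (adj : PySem.Dict PvNode (List PvNode)) (visited : PySem.Set PvNode)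
    (f : PvNode) : pvMeasure adj (PySem.Set.add visited f) ≤ pvMeasure adj visited :=
  pvMeasure_le_of_contains adj visited _ (fun x => pvContains_add_of_contains visited f x)

lemma pvMeasure_add_lt (adj : PySem.Dict PvNode (List PvNode)) (visited : PySem.Set PvNode)
    (f : PvNode) (hk : adj.contains f = true) (hv : PySem.Set.contains visited f = false) :
    pvMeasure adj (PySem.Set.add visited f) < pvMeasure adj visited := by
  unfold pvMeasure
  apply pvFilter_length_lt (f := f)
  · intro x _ hx
    cases hcv : PySem.Set.contains visited x with
    | false => simp
    | true => rw [pvContains_add_of_contains visited f x hcv] at hx; simp at hx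
  · exact (PySem.Dict.contains_iff_mem_keys adj f).mp hk
  · have hm : f ∈ PySem.Set.add visited f := (PySem.Set.mem_add visited f f).mpr (Or.inr rfl)
    simp only [PySem.Set.contains]
    simp [hm]
  · simp only [PySem.Set.contains]
    simpa using hv

lemma pvGetD_empty_of_not_contains (adj : PySem.Dict PvNode (List PvNode)) (f : PvNode)
    (h : adj.contains f = false) : adj.getD f [] = [] :=
  PySem.Dict.getD_of_not_contains adj [] h

-- B's while-loop over an explicit stack (stack top = list head; Python's pop() from the end of the
-- list together with pushing reversed(children) is exactly popping the head and prepending the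
-- children in order).  Terminating: each step either consumes a stack entry or visits a new key.
def pvChainLoop (adj : PySem.Dict PvNode (List PvNode)) (stack : List (PvNode × String))
    (visited : PySem.Set PvNode) (lines : String) : String :=
  match stack with
  | [] => lines
  | (function, indent) :: rest =>
    if PySem.Set.contains visited function then
      pvChainLoop adj rest visited (lines ++ (indent ++ function.2 ++ " (recursive call)\n"))
    else
      pvChainLoop adj ((adj.getD function []).map (fun c => (c, indent ++ "    ")) ++ rest)
        (PySem.Set.add visited function) (lines ++ (indent ++ function.2 ++ "\n"))
termination_by (pvMeasure adj visited, stack.length)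
decreasing_by
  · exact Prod.Lex.right _ (Nat.lt_succ_self _)
  · rename_i hv
    by_cases hk : adj.contains function = true
    · exact Prod.Lex.left _ _ (pvMeasure_add_lt adj visited function hk (by simpa using hv))
    · rw [pvGetD_empty_of_not_contains adj function (by simpa using hk)]
      rcases Nat.lt_or_eq_of_le (pvMeasure_add_le adj visited function) with h | h
      · exact Prod.Lex.left _ _ h
      · rw [h]; exact Prod.Lex.right _ (by simp)

def get_dependency_chain_str_py_alt (call_graph : List (Option String × String × List (Option String × String))) (target_function : String) : String :=
  let adj := pvAdjList call_graph
  pvChainLoop adj [(pvStartNode target_function, "")] PySem.Set.empty ""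

-- ===== PRECONDITION & SPEC =====
def Spec_get_dependency_chain_str_py (call_graph : List (Option String × String × List (Option String × String))) (target_function : String) (out : String) : Prop := out = get_dependency_chain_str_py_alt call_graph target_function
instance (call_graph : List (Option String × String × List (Option String × String))) (target_function : String) (out : String) : Decidable (Spec_get_dependency_chain_str_py call_graph target_function out) := by unfold Spec_get_dependency_chain_str_py; infer_instance

-- ===== CLAIM (what is proved, stated in full; the proofs are below) =====
def Claim_equal_get_dependency_chain_str_py : Prop := ∀ (call_graph : List (Option String × String × List (Option String × String))) (target_function : String), Dom_get_dependency_chain_str_py call_graph target_function → Spec_get_dependency_chain_str_py call_graph target_function (get_dependency_chain_str_py call_graph target_function)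

-- ===== LEMMAS AND PROOFS =====

-- the visited set only grows through A's recursion
lemma pvBuild_mono (adj : PySem.Dict PvNode (List PvNode)) (fuel : Nat) :
    (∀ f ind vis s v', pvBuildChain adj fuel f ind vis = some (s, v') →
      ∀ x, x ∈ vis → x ∈ v') ∧
    (∀ cs ind vis s v', pvBuildList adj fuel cs ind vis = some (s, v') →
      ∀ x, x ∈ vis → x ∈ v') := by
  induction fuel with
  | zero =>
    constructor
    · intro f ind vis s v' h; simp [pvBuildChain] at h
    · intro cs ind vis s v' h x hx
      cases cs with
      | nil => simp [pvBuildList] at h; rw [← h.2]; exact hx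
      | cons c rest => simp [pvBuildList, pvBuildChain] at h
  | succ fuel ih =>
    have hchain : ∀ f ind vis s v', pvBuildChain adj (fuel + 1) f ind vis = some (s, v') →
        ∀ x, x ∈ vis → x ∈ v' := by
      intro f ind vis s v' h x hx
      rw [pvBuildChain] at h
      by_cases hv : f ∈ vis
      · simp [PySem.Set.contains, hv] at h
        rw [← h.2]; exact hx
      · simp only [PySem.Set.contains] at h
        rw [if_neg (by simpa using hv)] at h
        cases hlist : pvBuildList adj fuel (adj.getD f []) (ind ++ "    ") (PySem.Set.add vis f) with
        | none => rw [hlist] at h; simp at h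
        | some r =>
          obtain ⟨s0, v0⟩ := r
          rw [hlist] at h
          simp at h
          rw [← h.2]
          exact ih.2 _ _ _ _ _ hlist x ((PySem.Set.mem_add vis f x).mpr (Or.inl hx))
    refine ⟨hchain, ?_⟩
    intro cs ind vis s v' h x hx
    induction cs generalizing vis s v' x with
    | nil => simp [pvBuildList] at h; rw [← h.2]; exact hx
    | cons c rest ihc =>
      rw [pvBuildList] at h
      cases h1 : pvBuildChain adj (fuel + 1) c ind vis with
      | none => rw [h1] at h; simp at h
      | some r1 =>
        obtain ⟨s1, v1⟩ := r1
        rw [h1] at h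
        simp only [] at h
        cases h2 : pvBuildList adj (fuel + 1) rest ind v1 with
        | none => rw [h2] at h; simp at h
        | some r2 =>
          obtain ⟨s2, v2⟩ := r2
          rw [h2] at h
          simp at h
          rw [← h.2]
          exact ihc (vis := v1) (s := s2) (v' := v2) (x := x) h2 (hchain _ _ _ _ _ h1 x hx)

-- with fuel > pvMeasure, A's recursion never runs out of fuel
lemma pvBuild_total (adj : PySem.Dict PvNode (List PvNode)) (fuel : Nat) :
    (∀ f ind vis, pvMeasure adj vis < fuel → (pvBuildChain adj fuel f ind vis).isSome) ∧
    (∀ cs ind vis, pvMeasure adj vis < fuel → (pvBuildList adj fuel cs ind vis).isSome) := by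
  induction fuel with
  | zero =>
    exact ⟨fun f ind vis h => absurd h (Nat.not_lt_zero _),
           fun cs ind vis h => absurd h (Nat.not_lt_zero _)⟩
  | succ fuel ih =>
    have hchain : ∀ f ind vis, pvMeasure adj vis < fuel + 1 →
        (pvBuildChain adj (fuel + 1) f ind vis).isSome := by
      intro f ind vis hm
      rw [pvBuildChain]
      by_cases hv : f ∈ vis
      · simp only [PySem.Set.contains]
        rw [if_pos (by simpa using hv)]
        simp
      · simp only [PySem.Set.contains]
        rw [if_neg (by simpa using hv)]
        by_cases hk : adj.contains f = true
        · have hlt : pvMeasure adj (PySem.Set.add vis f) < fuel := by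
            have := pvMeasure_add_lt adj vis f hk (by simp only [PySem.Set.contains]; simpa using hv)
            omega
          cases hlist : pvBuildList adj fuel (adj.getD f []) (ind ++ "    ") (PySem.Set.add vis f) with
          | none =>
            have := ih.2 (adj.getD f []) (ind ++ "    ") (PySem.Set.add vis f) hlt
            rw [hlist] at this; simp at this
          | some r => obtain ⟨s0, v0⟩ := r; simp
        · rw [pvGetD_empty_of_not_contains adj f (by simpa using hk)]
          simp [pvBuildList]
    refine ⟨hchain, ?_⟩
    intro cs ind vis hm
    induction cs generalizing vis with
    | nil => simp [pvBuildList]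
    | cons c rest ihc =>
      rw [pvBuildList]
      cases h1 : pvBuildChain adj (fuel + 1) c ind vis with
      | none =>
        have := hchain c ind vis hm
        rw [h1] at this; simp at this
      | some r1 =>
        obtain ⟨s1, v1⟩ := r1
        have hle : pvMeasure adj v1 ≤ pvMeasure adj vis := by
          apply pvMeasure_le_of_contains
          intro x hx
          simp only [PySem.Set.contains] at hx ⊢
          simp at hx ⊢
          exact (pvBuild_mono adj (fuel + 1)).1 _ _ _ _ _ h1 x hx
        cases h2 : pvBuildList adj (fuel + 1) rest ind v1 with
        | none =>
          have := ihc v1 (by omega)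
          rw [h2] at this; simp at this
        | some r2 => obtain ⟨s2, v2⟩ := r2; simp [h2]

-- bridge: one recursive expansion of A equals running B's stack loop on the pushed frame(s)
lemma pvBridge (adj : PySem.Dict PvNode (List PvNode)) (fuel : Nat) :
    (∀ f ind vis s v', pvBuildChain adj fuel f ind vis = some (s, v') →
      ∀ rest acc, pvChainLoop adj ((f, ind) :: rest) vis acc = pvChainLoop adj rest v' (acc ++ s)) ∧
    (∀ cs ind vis s v', pvBuildList adj fuel cs ind vis = some (s, v') →
      ∀ rest acc, pvChainLoop adj (cs.map (fun c => (c, ind)) ++ rest) vis acc = pvChainLoop adj rest v' (acc ++ s)) := by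
  induction fuel with
  | zero =>
    constructor
    · intro f ind vis s v' h; simp [pvBuildChain] at h
    · intro cs ind vis s v' h rest acc
      cases cs with
      | nil =>
        simp [pvBuildList] at h
        obtain ⟨rfl, rfl⟩ := h
        simp [String.append_empty]
      | cons c rest' => simp [pvBuildList, pvBuildChain] at h
  | succ fuel ih =>
    have hchain : ∀ f ind vis s v', pvBuildChain adj (fuel + 1) f ind vis = some (s, v') →
        ∀ rest acc, pvChainLoop adj ((f, ind) :: rest) vis acc = pvChainLoop adj rest v' (acc ++ s) := by
      intro f ind vis s v' h rest acc
      rw [pvBuildChain] at h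
      by_cases hv : f ∈ vis
      · simp [PySem.Set.contains, hv] at h
        obtain ⟨h1, rfl⟩ := h
        rw [pvChainLoop, if_pos (by simpa [PySem.Set.contains] using hv), ← h1]
      · simp only [PySem.Set.contains] at h
        rw [if_neg (by simpa using hv)] at h
        cases hlist : pvBuildList adj fuel (adj.getD f []) (ind ++ "    ") (PySem.Set.add vis f) with
        | none => rw [hlist] at h; simp at h
        | some r =>
          obtain ⟨s0, v0⟩ := r
          rw [hlist] at h
          simp at h
          obtain ⟨h1, rfl⟩ := h
          rw [pvChainLoop, if_neg (by simpa [PySem.Set.contains] using hv)]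
          rw [ih.2 _ _ _ _ _ hlist rest]
          rw [← h1]
          simp [String.append_assoc]
    refine ⟨hchain, ?_⟩
    intro cs ind vis s v' h rest acc
    induction cs generalizing vis s v' rest acc with
    | nil =>
      simp [pvBuildList] at h
      obtain ⟨rfl, rfl⟩ := h
      simp [String.append_empty]
    | cons c rest' ihc =>
      rw [pvBuildList] at h
      cases h1 : pvBuildChain adj (fuel + 1) c ind vis with
      | none => rw [h1] at h; simp at h
      | some r1 =>
        obtain ⟨s1, v1⟩ := r1
        rw [h1] at h
        simp only [] at h
        cases h2 : pvBuildList adj (fuel + 1) rest' ind v1 with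
        | none => rw [h2] at h; simp at h
        | some r2 =>
          obtain ⟨s2, v2⟩ := r2
          rw [h2] at h
          simp at h
          obtain ⟨hs, rfl⟩ := h
          simp only [List.map_cons, List.cons_append]
          rw [hchain _ _ _ _ _ h1 (rest'.map (fun c => (c, ind)) ++ rest) acc]
          rw [ihc (vis := v1) (s := s2) (v' := v2) h2 rest (acc ++ s1)]
          rw [← hs]
          simp [String.append_assoc]

-- ===== VERDICT (by name: the statement is the Claim_ definition above) =====
theorem get_dependency_chain_str_py_spec : Claim_equal_get_dependency_chain_str_py := by
  intro cg tf _
  unfold Spec_get_dependency_chain_str_py get_dependency_chain_str_py get_dependency_chain_str_py_alt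
  have hm : pvMeasure (pvAdjList cg) PySem.Set.empty < (pvAdjList cg).keys.length + 1 := by
    simp only [pvMeasure, PySem.Set.empty, PySem.Set.contains]
    simp
  have htot := (pvBuild_total (pvAdjList cg) ((pvAdjList cg).keys.length + 1)).1
    (pvStartNode tf) "" PySem.Set.empty hm
  cases hc : pvBuildChain (pvAdjList cg) ((pvAdjList cg).keys.length + 1) (pvStartNode tf) "" PySem.Set.empty with
  | none => rw [hc] at htot; simp at htot
  | some r =>
    obtain ⟨s, v⟩ := r
    have hb := (pvBridge (pvAdjList cg) ((pvAdjList cg).keys.length + 1)).1 _ _ _ _ _ hc [] ""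
    simp only []
    rw [hc, hb, pvChainLoop]
    exact String.empty_append.symm
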